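-- pv_equiv track=rewrite | github.com/microphoneabuser/math-py | mini-cli-uti/main.py | get_sum_sec
-- ===== SOURCE A (Python) =====
-- def get_sum_sec(arr):
--     first, last = None, None
--     for i in range(len(arr)):
--         if first == None and arr[i] < 0:
--             first = i
--         elif arr[i] < 0:
--             last = i
--     if not last:
--         return None
--     return sum(arr[first + 1:last])
-- ===== SOURCE B (Python) =====
-- def _first_neg(xs):
--     for i, x in enumerate(xs):
--         if x < 0:
--             return i
--     return None
--
--
-- def get_sum_sec(arr):
--     first = _first_neg(arr)
--     if first is None:
--         return None
--     last = len(arr) - 1 - _first_neg(list(reversed(arr)))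
--     if last == first:
--         return None
--     return sum(arr[first + 1:last])
-- ===== Notes on version B (the rewrite author's own statement) =====
-- stated objective: alternative
-- what changed: Replaces the single indexed pass that maintains both first/last with two short-circuiting scans (forward for the first negative index, backward over the reversed list for the last) followed by one slice sum.
import Mathlib
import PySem

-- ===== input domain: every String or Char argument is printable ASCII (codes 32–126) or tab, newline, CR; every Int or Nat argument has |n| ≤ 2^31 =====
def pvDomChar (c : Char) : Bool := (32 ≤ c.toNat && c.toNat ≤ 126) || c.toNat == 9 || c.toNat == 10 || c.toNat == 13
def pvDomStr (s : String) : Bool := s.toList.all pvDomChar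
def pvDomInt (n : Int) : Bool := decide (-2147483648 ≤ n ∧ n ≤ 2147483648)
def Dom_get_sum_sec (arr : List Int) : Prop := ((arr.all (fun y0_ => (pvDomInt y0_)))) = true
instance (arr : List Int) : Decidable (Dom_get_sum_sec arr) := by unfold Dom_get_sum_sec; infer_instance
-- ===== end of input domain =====

-- B replaces A's single indexed pass maintaining first/last with two short-circuiting
-- scans (forward for the first negative, backward over the reversed list for the last)
-- and one slice sum; same asymptotic cost, different decomposition.

-- ===== PORT A =====
-- literal transliteration of A: one indexed loop over range(len(arr)) carrying (first, last),
-- then Python's truthiness test 'not last' (none or 0) and sum(arr[first+1:last]).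
-- (st.1.getD 0: Python reads the int 'first' there; it is always set when 'last' is truthy.)
def get_sum_sec (arr : List Int) : Option Int :=
  let st := (PySem.List.pyRange 0 (arr.length : Int) 1).foldl
    (fun (st : Option Int × Option Int) i =>
      if st.1 = none ∧ PySem.List.pyGetD arr i 0 < 0 then (some i, st.2)
      else if PySem.List.pyGetD arr i 0 < 0 then (st.1, some i)
      else st)
    (none, none)
  if st.2 = none ∨ st.2 = some 0 then none
  else some ((PySem.List.slice arr (some (st.1.getD 0 + 1)) (some (st.2.getD 0))).sum)

-- ===== PORT B =====
-- B's helper: forward scan returning the index (counting from i) of the first negative.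
def firstNegFrom : List Int → Int → Option Int
  | [], _ => none
  | x :: xs, i => if x < 0 then some i else firstNegFrom xs (i + 1)

def get_sum_sec_alt (arr : List Int) : Option Int :=
  match firstNegFrom arr 0 with
  | none => none
  | some first =>
    match firstNegFrom arr.reverse 0 with
    | none => none   -- unreachable: a negative exists
    | some r =>
      let last : Int := (arr.length : Int) - 1 - r
      if last = first then none
      else some ((PySem.List.slice arr (some (first + 1)) (some last)).sum)

-- ===== PRECONDITION & SPEC =====
def Spec_get_sum_sec (arr : List Int) (out : Option Int) : Prop := out = get_sum_sec_alt arr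
instance (arr : List Int) (out : Option Int) : Decidable (Spec_get_sum_sec arr out) := by unfold Spec_get_sum_sec; infer_instance

-- ===== CLAIM (what is proved, stated in full; the proofs are below) =====
def Claim_equal_get_sum_sec : Prop := ∀ (arr : List Int), Dom_get_sum_sec arr → Spec_get_sum_sec arr (get_sum_sec arr)

-- ===== LEMMAS AND PROOFS =====

def aStep (st : Option Int × Option Int) (i x : Int) : Option Int × Option Int :=
  if st.1 = none ∧ x < 0 then (some i, st.2)
  else if x < 0 then (st.1, some i)
  else st

def lastNeg : List Int → Int → Option Int
  | [], _ => none
  | x :: xs, s =>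
    match lastNeg xs (s + 1) with
    | some j => some j
    | none => if x < 0 then some s else none

def aFoldSpec : List Int → Int → Option Int × Option Int
  | [], _ => (none, none)
  | x :: xs, s => if x < 0 then (some s, lastNeg xs (s + 1)) else aFoldSpec xs (s + 1)

lemma foldl_pyRange_getD_enum {σ : Type} (g : σ → Int → Int → σ) :
    ∀ (arr pre : List Int) (init : σ),
      (PySem.List.pyRange (pre.length : Int) ((pre.length + arr.length : Nat) : Int) 1).foldl
          (fun st i => g st i (PySem.List.pyGetD (pre ++ arr) i 0)) init
      = (PySem.List.enumerate arr (pre.length : Int)).foldl (fun st p => g st p.1 p.2) init := by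
  intro arr
  induction arr with
  | nil =>
    intro pre init
    rw [PySem.List.pyRange_one_eq_nil (by simp)]
    simp [PySem.List.enumerate]
  | cons x xs ih =>
    intro pre init
    rw [PySem.List.pyRange_one_cons (by push_cast [List.length_cons]; omega)]
    have hx : PySem.List.pyGetD (pre ++ x :: xs) (pre.length : Int) 0 = x := by
      simp [List.getD]
    have h := ih (pre ++ [x]) (g init (pre.length : Int) x)
    simp only [List.length_append, List.length_cons] at h ⊢
    rw [PySem.List.enumerate_cons]
    simp only [List.foldl_cons, hx]
    rw [show ((pre.length : Int) + 1) = ((pre.length + 1 : Nat) : Int) by push_cast; ring] at *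
    rw [show (pre.length + (xs.length + 1)) = (pre.length + 1 + xs.length) by omega]
    rw [show pre ++ x :: xs = (pre ++ [x]) ++ xs from by simp]
    exact h


lemma foldl_aStep_some (f : Int) :
    ∀ (xs : List Int) (s : Int) (l0 : Option Int),
      (PySem.List.enumerate xs s).foldl (fun st p => aStep st p.1 p.2) (some f, l0)
      = (some f, match lastNeg xs s with | some j => some j | none => l0) := by
  intro xs
  induction xs with
  | nil => intro s l0; simp [PySem.List.enumerate, lastNeg]
  | cons x xs ih =>
    intro s l0
    rw [PySem.List.enumerate_cons]
    simp only [List.foldl_cons]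
    by_cases hx : x < 0
    · rw [show aStep (some f, l0) s x = (some f, some s) from by simp [aStep, hx]]
      rw [ih]
      simp only [lastNeg]
      rcases h : lastNeg xs (s+1) with _ | j <;> simp [hx]
    · rw [show aStep (some f, l0) s x = (some f, l0) from by simp [aStep, hx]]
      rw [ih]
      simp only [lastNeg]
      rcases h : lastNeg xs (s+1) with _ | j <;> simp [hx]

lemma foldl_aStep_none :
    ∀ (xs : List Int) (s : Int),
      (PySem.List.enumerate xs s).foldl (fun st p => aStep st p.1 p.2) (none, none)
      = aFoldSpec xs s := by
  intro xs
  induction xs with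
  | nil => intro s; simp [PySem.List.enumerate, aFoldSpec]
  | cons x xs ih =>
    intro s
    rw [PySem.List.enumerate_cons]
    simp only [List.foldl_cons]
    by_cases hx : x < 0
    · rw [show aStep (none, none) s x = (some s, none) from by simp [aStep, hx]]
      rw [foldl_aStep_some]
      simp only [aFoldSpec, if_pos hx]
      rcases h : lastNeg xs (s+1) with _ | j <;> simp
    · rw [show aStep (none, none) s x = (none, none) from by simp [aStep, hx]]
      rw [ih]
      simp [aFoldSpec, hx]

lemma firstNegFrom_append (x : Int) :
    ∀ (ys : List Int) (i : Int),
      firstNegFrom (ys ++ [x]) i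
      = match firstNegFrom ys i with
        | some j => some j
        | none => if x < 0 then some (i + ys.length) else none := by
  intro ys
  induction ys with
  | nil => intro i; simp [firstNegFrom]
  | cons y ys ih =>
    intro i
    simp only [List.cons_append, firstNegFrom]
    by_cases hy : y < 0
    · simp [hy]
    · simp only [if_neg hy, ih]
      rcases h : firstNegFrom ys (i+1) with _ | j <;> simp [List.length_cons] <;> ring_nf

lemma firstNegFrom_bounds :
    ∀ (xs : List Int) (i j : Int), firstNegFrom xs i = some j → i ≤ j ∧ j < i + xs.length := by
  intro xs
  induction xs with
  | nil => intro i j h; simp [firstNegFrom] at h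
  | cons x xs ih =>
    intro i j h
    simp only [firstNegFrom] at h
    by_cases hx : x < 0
    · rw [if_pos hx] at h; cases h; constructor <;> simp <;> push_cast <;> omega
    · rw [if_neg hx] at h
      have := ih (i+1) j h
      push_cast [List.length_cons] at this ⊢
      omega

lemma lastNeg_eq_reverse :
    ∀ (xs : List Int) (s : Int),
      lastNeg xs s
      = match firstNegFrom xs.reverse 0 with
        | none => none
        | some r => some (s + xs.length - 1 - r) := by
  intro xs
  induction xs with
  | nil => intro s; simp [lastNeg, firstNegFrom]
  | cons x xs ih =>
    intro s
    simp only [lastNeg, List.reverse_cons, firstNegFrom_append, ih]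
    rcases h : firstNegFrom xs.reverse 0 with _ | r
    · by_cases hx : x < 0 <;> simp [hx, List.length_cons] <;> push_cast <;> ring_nf
    · have hb := firstNegFrom_bounds _ _ _ h
      simp only []
      push_cast [List.length_cons]
      congr 1
      ring

lemma aFoldSpec_fst :
    ∀ (xs : List Int) (s : Int), (aFoldSpec xs s).1 = firstNegFrom xs s := by
  intro xs
  induction xs with
  | nil => intro s; simp [aFoldSpec, firstNegFrom]
  | cons x xs ih =>
    intro s
    by_cases hx : x < 0 <;> simp [aFoldSpec, firstNegFrom, hx, ih]

lemma aFoldSpec_snd :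
    ∀ (xs : List Int) (s : Int),
      (aFoldSpec xs s).2
      = match firstNegFrom xs.reverse 0, firstNegFrom xs s with
        | some r, some f => if s + xs.length - 1 - r = f then none else some (s + xs.length - 1 - r)
        | _, _ => none := by
  intro xs
  induction xs with
  | nil => intro s; simp [aFoldSpec, firstNegFrom]
  | cons x xs ih =>
    intro s
    by_cases hx : x < 0
    · simp only [aFoldSpec, if_pos hx, lastNeg_eq_reverse, List.reverse_cons]
      rw [firstNegFrom_append]
      rcases h : firstNegFrom xs.reverse 0 with _ | r
      · simp only [firstNegFrom, if_pos hx]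
        simp [hx, List.length_cons]
        ring
      · have hb := firstNegFrom_bounds _ _ _ h
        rw [List.length_reverse] at hb
        simp only [firstNegFrom, if_pos hx]
        simp only [List.length_cons]
        rw [if_neg (by push_cast at hb ⊢; omega)]
        congr 1
        push_cast
        ring
    · simp only [aFoldSpec, if_neg hx, ih, List.reverse_cons]
      rw [firstNegFrom_append]
      rcases h : firstNegFrom xs.reverse 0 with _ | r
      · simp [firstNegFrom, hx]
      · simp only [firstNegFrom, if_neg hx]
        rcases h2 : firstNegFrom xs (s+1) with _ | f
        · simp
        · simp only [List.length_cons]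
          have : s + 1 + (xs.length : Int) - 1 - r = s + ((xs.length : Int) + 1) - 1 - r := by ring
          rw [this]
          push_cast
          ring_nf

lemma firstNegFrom_elem :
    ∀ (xs : List Int) (i j : Int), firstNegFrom xs i = some j →
      ∃ h : (j - i).toNat < xs.length, xs[(j - i).toNat] < 0 := by
  intro xs
  induction xs with
  | nil => intro i j h; simp [firstNegFrom] at h
  | cons x xs ih =>
    intro i j h
    simp only [firstNegFrom] at h
    by_cases hx : x < 0
    · rw [if_pos hx] at h
      cases h
      refine ⟨by simp, ?_⟩
      simp [hx]
    · rw [if_neg hx] at h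
      obtain ⟨hlt, hneg⟩ := ih (i+1) j h
      have hij : i + 1 ≤ j := (firstNegFrom_bounds _ _ _ h).1
      have ht : (j - i).toNat = (j - (i+1)).toNat + 1 := by omega
      refine ⟨by simp; omega, ?_⟩
      rw [List.getElem_cons]
      split
      · omega
      · convert hneg using 2
        omega

lemma firstNegFrom_min :
    ∀ (xs : List Int) (i j : Int), firstNegFrom xs i = some j →
      ∀ (k : Nat) (hk : k < xs.length), (i + k) < j → 0 ≤ xs[k] := by
  intro xs
  induction xs with
  | nil => intro i j h; simp [firstNegFrom] at h
  | cons x xs ih =>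
    intro i j h k hk hkj
    simp only [firstNegFrom] at h
    by_cases hx : x < 0
    · rw [if_pos hx] at h; cases h; omega
    · rw [if_neg hx] at h
      match k with
      | 0 => simpa using le_of_not_gt hx
      | k + 1 =>
        rw [List.getElem_cons_succ]
        exact ih (i+1) j h k (by simpa using hk) (by push_cast at hkj ⊢; omega)

lemma A_fold_eq (arr : List Int) :
    (PySem.List.pyRange 0 (arr.length : Int) 1).foldl
        (fun st i => aStep st i (PySem.List.pyGetD arr i 0)) (none, none)
      = aFoldSpec arr 0 := by
  have h := foldl_pyRange_getD_enum aStep arr [] (none, none)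
  rw [foldl_aStep_none] at h
  simpa using h

theorem get_sum_sec_spec : Claim_equal_get_sum_sec := by
  intro arr _
  unfold Spec_get_sum_sec get_sum_sec get_sum_sec_alt
  have h' : (PySem.List.pyRange 0 (arr.length : Int) 1).foldl
      (fun (st : Option Int × Option Int) i =>
        if st.1 = none ∧ PySem.List.pyGetD arr i 0 < 0 then (some i, st.2)
        else if PySem.List.pyGetD arr i 0 < 0 then (st.1, some i)
        else st) (none, none) = aFoldSpec arr 0 := A_fold_eq arr
  rw [h']
  rcases hf : firstNegFrom arr 0 with _ | f
  · rcases hr : firstNegFrom arr.reverse 0 with _ | r <;>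
      simp [aFoldSpec_snd, hf, hr]
  · rcases hr : firstNegFrom arr.reverse 0 with _ | r
    · simp [aFoldSpec_snd, hf, hr]
    · have hsnd := aFoldSpec_snd arr 0
      rw [hf, hr] at hsnd
      simp only [zero_add] at hsnd
      set l : Int := (arr.length : Int) - 1 - r with hl
      by_cases hlf : l = f
      · rw [if_pos hlf] at hsnd
        simp [hsnd]
        omega
      · rw [if_neg hlf] at hsnd
        -- l ≠ 0: first index f is ≥ 0 and f ≤ l
        have hfb := firstNegFrom_bounds _ _ _ hf
        have hfl : f ≤ l := by
          by_contra hgt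
          rw [not_le] at hgt
          obtain ⟨he, hneg⟩ := firstNegFrom_elem _ _ _ hf
          simp only [sub_zero] at he hneg
          have hrb := firstNegFrom_bounds _ _ _ hr
          rw [List.length_reverse] at hrb
          have hk : (arr.length - 1 - f.toNat) < arr.length := by omega
          have hmin := firstNegFrom_min _ _ _ hr (arr.length - 1 - f.toNat)
            (by rw [List.length_reverse]; omega) (by push_cast; omega)
          simp only [List.getElem_reverse] at hmin
          have heq : arr.length - 1 - (arr.length - 1 - f.toNat) = f.toNat := by omega
          simp only [heq] at hmin
          omega
        have hl0 : ¬ (l = 0) := by omega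
        have hfst := aFoldSpec_fst arr 0
        rw [hf] at hfst
        simp only [hsnd, hfst]
        simp [hl0]
        exact ⟨by omega, by rw [← hl]⟩
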